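-- pv_equiv track=rewrite | github.com/zht7063/Agent-RAG | src/utils/helpers/chunking.py | chunk_by_paragraphs
-- ===== SOURCE A (Python) =====
-- from typing import List, Dict, Optional
--
-- def chunk_by_paragraphs(text: str, max_paragraphs: int = 3) -> List[str]:
--     """
--     按段落分块
--
--     Args:
--         text: 输入文本
--         max_paragraphs: 每块最大段落数
--
--     Returns:
--         分块列表
--     """
--     # 简单的段落分块，基于 \n\n 分割
--     paragraphs = text.split("\n\n")
--     paragraphs = [p.strip() for p in paragraphs if p.strip()]
--
--     chunks = []
--     current_chunk = []
--
--     for paragraph in paragraphs: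
--         current_chunk.append(paragraph)
--         if len(current_chunk) >= max_paragraphs:
--             chunks.append("\n\n".join(current_chunk))
--             current_chunk = []
--
--     # 添加剩余段落
--     if current_chunk:
--         chunks.append("\n\n".join(current_chunk))
--
--     return chunks
-- ===== SOURCE B (Python) =====
-- def chunk_by_paragraphs(text, max_paragraphs=3):
--     paragraphs = [p.strip() for p in text.split("\n\n") if p.strip()]
--     k = max(max_paragraphs, 1)
--     chunks = []
--     ps = paragraphs
--     while ps:
--         chunks.append("\n\n".join(ps[:k]))
--         ps = ps[k:]
--     return chunks
-- ===== Notes on version B (the rewrite author's own statement) =====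
-- stated objective: simpler
-- what changed: Replaces A's per-paragraph accumulator loop with a flush-at-threshold condition and a trailing remainder branch by a stride loop that slices max(max_paragraphs,1) paragraphs at a time off the paragraph list.
import Mathlib
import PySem

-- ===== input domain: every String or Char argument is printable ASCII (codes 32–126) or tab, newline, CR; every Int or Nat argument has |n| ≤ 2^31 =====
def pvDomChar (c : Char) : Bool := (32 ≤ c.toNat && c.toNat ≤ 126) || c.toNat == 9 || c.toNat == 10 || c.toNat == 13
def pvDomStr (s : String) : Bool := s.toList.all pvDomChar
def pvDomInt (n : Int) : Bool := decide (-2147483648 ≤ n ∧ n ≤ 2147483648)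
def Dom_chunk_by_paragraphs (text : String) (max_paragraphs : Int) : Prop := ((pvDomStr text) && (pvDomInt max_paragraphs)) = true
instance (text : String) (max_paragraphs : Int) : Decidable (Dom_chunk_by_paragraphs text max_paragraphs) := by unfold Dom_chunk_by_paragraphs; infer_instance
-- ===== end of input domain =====

-- B replaces A's per-paragraph accumulator-and-flush loop by an idiomatic stride loop
-- that slices k paragraphs at a time off the front of the list (objective: simpler).

-- ===== PORT A =====
-- the body of A's 'for paragraph in paragraphs' loop, acting on the state (chunks, current_chunk)
def pvStepA (mp : Int) (st : List String × List String) (paragraph : String) : List String × List String :=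
  let cur := st.2 ++ [paragraph]
  if mp ≤ (cur.length : Int) then (st.1 ++ [PySem.Str.join "\n\n" cur], []) else (st.1, cur)

def chunk_by_paragraphs (text : String) (max_paragraphs : Int) : List String :=
  let paragraphs := (((PySem.Str.split? text "\n\n").getD []).filter (fun p => PySem.Str.strip p != "")).map PySem.Str.strip
  let st := paragraphs.foldl (pvStepA max_paragraphs) ([], [])
  if st.2.isEmpty then st.1 else st.1 ++ [PySem.Str.join "\n\n" st.2]

-- ===== PORT B =====
-- Source B's 'while ps:' loop; since k ≥ 1, Python's ps[:k] is List.take k and ps[k:] on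
-- p :: rest is rest.drop (k-1) (exact: nonnegative in-bound-clamped slice = take/drop)
def pvChunkLoop (k : Nat) (chunks ps : List String) : List String :=
  match ps with
  | [] => chunks
  | p :: rest => pvChunkLoop k (chunks ++ [PySem.Str.join "\n\n" ((p :: rest).take k)]) (rest.drop (k - 1))
termination_by ps.length
decreasing_by simp [List.length_drop]

def chunk_by_paragraphs_alt (text : String) (max_paragraphs : Int) : List String :=
  let paragraphs := (((PySem.Str.split? text "\n\n").getD []).filter (fun p => PySem.Str.strip p != "")).map PySem.Str.strip
  let k : Int := max max_paragraphs 1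
  pvChunkLoop k.toNat [] paragraphs

-- ===== PRECONDITION & SPEC =====
def Spec_chunk_by_paragraphs (text : String) (max_paragraphs : Int) (out : List String) : Prop := out = chunk_by_paragraphs_alt text max_paragraphs
instance (text : String) (max_paragraphs : Int) (out : List String) : Decidable (Spec_chunk_by_paragraphs text max_paragraphs out) := by unfold Spec_chunk_by_paragraphs; infer_instance

-- ===== CLAIM (what is proved, stated in full; the proofs are below) =====
def Claim_equal_chunk_by_paragraphs : Prop := ∀ (text : String) (max_paragraphs : Int), Dom_chunk_by_paragraphs text max_paragraphs → Spec_chunk_by_paragraphs text max_paragraphs (chunk_by_paragraphs text max_paragraphs)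

-- ===== LEMMAS AND PROOFS =====

lemma pvChunkLoop_nil (k : Nat) (chunks : List String) : pvChunkLoop k chunks [] = chunks := by
  unfold pvChunkLoop
  rfl

lemma pvChunkLoop_cons (k : Nat) (chunks : List String) (p : String) (rest : List String) :
    pvChunkLoop k chunks (p :: rest) =
      pvChunkLoop k (chunks ++ [PySem.Str.join "\n\n" ((p :: rest).take k)]) (rest.drop (k - 1)) := by
  conv_lhs => unfold pvChunkLoop

-- one unrolling of B's loop, phrased on the whole list
lemma pvChunkLoop_ne_nil (k : Nat) (hk : 1 ≤ k) (chunks l : List String) (hl : l ≠ []) :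
    pvChunkLoop k chunks l = pvChunkLoop k (chunks ++ [PySem.Str.join "\n\n" (l.take k)]) (l.drop k) := by
  cases l with
  | nil => exact absurd rfl hl
  | cons p rest =>
    rw [pvChunkLoop_cons]
    obtain ⟨m, rfl⟩ : ∃ m, k = m + 1 := ⟨k - 1, by omega⟩
    simp

-- A's flush-at-k loop, started with a partial chunk 'cur', produces exactly B's
-- stride chunks of cur ++ ps, appended to 'chunks'
lemma pvLoop_eq (mp : Int) (k : Nat) (hk : k = (max mp 1).toNat) :
    ∀ (ps chunks cur : List String), cur.length < k →
      (let st := ps.foldl (pvStepA mp) (chunks, cur);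
       if st.2.isEmpty then st.1 else st.1 ++ [PySem.Str.join "\n\n" st.2]) =
      pvChunkLoop k chunks (cur ++ ps) := by
  intro ps
  induction ps with
  | nil =>
    intro chunks cur hcur
    cases cur with
    | nil => simp [pvChunkLoop_nil]
    | cons p rest =>
      have h1 : (p :: rest).take k = p :: rest := List.take_of_length_le (by omega)
      have h2 : rest.drop (k - 1) = [] := List.drop_eq_nil_of_le (by simp at hcur; omega)
      simp only [List.foldl_nil, List.append_nil]
      rw [pvChunkLoop_cons, h2, pvChunkLoop_nil, h1]
      simp
  | cons p ps' ih =>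
    intro chunks cur hcur
    have hk1 : 1 ≤ k := by omega
    simp only [List.foldl_cons]
    by_cases hflush : mp ≤ ((cur ++ [p]).length : Int)
    · have hlen : (cur ++ [p]).length = k := by
        have := hflush
        simp only [List.length_append, List.length_cons, List.length_nil] at this ⊢
        omega
      have hstep : pvStepA mp (chunks, cur) p =
          (chunks ++ [PySem.Str.join "\n\n" (cur ++ [p])], []) := by
        unfold pvStepA
        rw [if_pos hflush]
      rw [hstep, ih _ [] (by simp; omega)]
      rw [pvChunkLoop_ne_nil k hk1 chunks (cur ++ p :: ps') (by simp)]
      have hre : cur ++ p :: ps' = (cur ++ [p]) ++ ps' := by simp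
      rw [hre, List.take_append_of_le_length (by omega), List.take_of_length_le (by omega),
          List.drop_append_of_le_length (by omega), List.drop_eq_nil_of_le (by omega)]
    · have hstep : pvStepA mp (chunks, cur) p = (chunks, cur ++ [p]) := by
        unfold pvStepA
        rw [if_neg hflush]
      have hlt : (cur ++ [p]).length < k := by
        simp only [List.length_append, List.length_cons, List.length_nil] at hflush ⊢
        omega
      rw [hstep, ih _ (cur ++ [p]) hlt]
      simp

-- ===== VERDICT (by name: the statement is the Claim_ definition above) =====
theorem chunk_by_paragraphs_spec : Claim_equal_chunk_by_paragraphs := by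
  intro text mp _
  unfold Spec_chunk_by_paragraphs
  simp only [chunk_by_paragraphs, chunk_by_paragraphs_alt]
  have := pvLoop_eq mp (max mp 1).toNat rfl
    (((PySem.Str.split? text "\n\n").getD []).filter (fun p => PySem.Str.strip p != "")
      |>.map PySem.Str.strip) [] [] (by simp)
  simpa using this
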